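-- pv_equiv track=rewrite | github.com/JonghyunLEE12/SWEA | 프로그래머스/1/92334. 신고 결과 받기/신고 결과 받기.py | solution
-- ===== SOURCE A (Python) =====
-- def solution(id_list, report, k):
--     answer = []
--     report = set(report)
--     singo_dic = dict()
--     report_dic = dict()
--
--     for id in id_list:
--         singo_dic[id] = []
--         report_dic[id] = 0
--
--     for rep in report:
--         name,report = rep.split( )
--         singo_dic[name].append(report)
--         report_dic[report] += 1
--
--
--     for id in id_list:
--         cnt = 0
--         for singo in singo_dic[id]:
--             if report_dic[singo] >= k:
--                 cnt += 1
--         answer.append(cnt)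
--
--
--     return answer
-- ===== SOURCE B (Python) =====
-- def solution(id_list, report, k):
--     pairs = [r.split() for r in set(report)]
--     targets = [p[1] for p in pairs]
--     return [sum(1 for p in pairs if p[0] == i and targets.count(p[1]) >= k) for i in id_list]
-- ===== Notes on version B (the rewrite author's own statement) =====
-- stated objective: alternative
-- what changed: B abandons A's two dictionaries (the per-reporter grouping dict of lists and the per-target counter dict): it splits the deduplicated reports into a plain list of word-pairs and answers each id by a direct comprehension over the pairs, re-counting each target's frequency with list.count instead of any precomputed counter.
import Mathlib
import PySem

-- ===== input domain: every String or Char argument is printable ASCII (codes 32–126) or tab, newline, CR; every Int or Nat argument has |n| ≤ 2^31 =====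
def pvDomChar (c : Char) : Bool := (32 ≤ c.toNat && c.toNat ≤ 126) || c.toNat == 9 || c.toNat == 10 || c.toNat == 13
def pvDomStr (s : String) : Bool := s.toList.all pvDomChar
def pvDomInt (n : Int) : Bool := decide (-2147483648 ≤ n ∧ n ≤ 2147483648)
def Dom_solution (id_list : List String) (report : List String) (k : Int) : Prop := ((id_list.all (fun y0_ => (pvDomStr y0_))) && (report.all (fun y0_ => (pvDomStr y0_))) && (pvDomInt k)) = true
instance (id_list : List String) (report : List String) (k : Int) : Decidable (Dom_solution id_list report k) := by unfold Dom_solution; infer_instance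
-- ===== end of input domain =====

-- B replaces A's two dictionaries (grouping dict of lists + counter dict) by a plain list of
-- split word-pairs and direct list.count rescans — same return value, an alternative (dict-free)
-- decomposition, not claimed faster.

-- ===== PORT A =====
-- Python A rebinds its local 'report' name only; the arguments are not mutated.
-- 'singo_dic[name].append(..)' / 'report_dic[report] += 1' are ported with Dict.modify, which is
-- exact whenever the key is present (guaranteed by Pre_solution; absent keys raise KeyError in Python).
def solution (id_list : List String) (report : List String) (k : Int) : List Int :=
  let reps := PySem.Set.ofList report
  let singo0 : PySem.Dict String (List String) :=
    id_list.foldl (fun d id => d.insert id []) PySem.Dict.empty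
  let repd0 : PySem.Dict String Int :=
    id_list.foldl (fun d id => d.insert id 0) PySem.Dict.empty
  let st := reps.foldl (fun (p : PySem.Dict String (List String) × PySem.Dict String Int) rep =>
      match PySem.Str.split₀ rep with
      | [name, target] => (p.1.modify name [] (· ++ [target]), p.2.modify target 0 (· + 1))
      | _ => (p.1, p.2)) (singo0, repd0)
  id_list.foldl (fun answer id =>
      answer ++ [(st.1.getD id []).foldl
        (fun cnt singo => if st.2.getD singo 0 ≥ k then cnt + 1 else cnt) 0]) []

-- ===== PORT B =====
-- p[0] / p[1] are ported with pyGetD; Pre_solution guarantees every split has exactly two words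
-- (a shorter split raises IndexError in Python B, excluded by Pre_solution).
def solution_alt (id_list : List String) (report : List String) (k : Int) : List Int :=
  let pairs := (PySem.Set.ofList report).map PySem.Str.split₀
  let targets := pairs.map (fun p => PySem.List.pyGetD p 1 "")
  id_list.map (fun i =>
    ((pairs.countP (fun p => PySem.List.pyGetD p 0 "" == i &&
        decide (((targets.count (PySem.List.pyGetD p 1 "")) : Int) ≥ k))) : Int))

-- ===== PRECONDITION & SPEC =====
-- Pre_ excludes exactly the inputs on which Python A raises: a report entry that does not split
-- into exactly two whitespace-separated words (ValueError), or whose reporter / reported name is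
-- absent from id_list (KeyError).
def Pre_solution (id_list : List String) (report : List String) (k : Int) : Prop :=
  ∀ r ∈ report, ∃ n ∈ id_list, ∃ t ∈ id_list, PySem.Str.split₀ r = [n, t]
instance (id_list : List String) (report : List String) (k : Int) : Decidable (Pre_solution id_list report k) := by unfold Pre_solution; infer_instance
def pvWitness_solution : List String × List String × Int :=
  (["ann", "bob", "cy"], ["ann bob", "bob cy", "cy bob", "ann bob"], 2)

def Spec_solution (id_list : List String) (report : List String) (k : Int) (out : List Int) : Prop := out = solution_alt id_list report k
instance (id_list : List String) (report : List String) (k : Int) (out : List Int) : Decidable (Spec_solution id_list report k out) := by unfold Spec_solution; infer_instance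

-- ===== CLAIM (what is proved, stated in full; the proofs are below) =====
def Claim_equal_solution : Prop := ∀ (id_list : List String) (report : List String) (k : Int), Dom_solution id_list report k → Pre_solution id_list report k → Spec_solution id_list report k (solution id_list report k)
-- ===== LEMMAS AND PROOFS =====

/-- 'name, target = rep.split()' as a partial unpacking (helper of the proofs only). -/
def unpack2 (rep : String) : Option (String × String) :=
  match PySem.Str.split₀ rep with
  | [n, t] => some (n, t)
  | _ => none

/-- A's loop that matches each report against its two words is the same loop over the pair list. -/
lemma foldl_match_eq {δ : Type} (L : List String) (f : δ → String → String → δ) (d : δ) :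
    L.foldl (fun d r => match PySem.Str.split₀ r with | [n, t] => f d n t | _ => d) d
      = (L.filterMap unpack2).foldl (fun d p => f d p.1 p.2) d := by
  induction L generalizing d with
  | nil => rfl
  | cons x L ih =>
    rcases h : PySem.Str.split₀ x with _ | ⟨n, _ | ⟨t, _ | ⟨u, rest⟩⟩⟩ <;>
      simp [unpack2, h, ih]

/-- When every entry splits into exactly two words, mapping split₀ is mapping the pair back to a list. -/
lemma map_split_eq_filterMap (L : List String)
    (h : ∀ r ∈ L, ∃ n t, PySem.Str.split₀ r = [n, t]) :
    L.map PySem.Str.split₀ = (L.filterMap unpack2).map (fun p => [p.1, p.2]) := by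
  induction L with
  | nil => rfl
  | cons x L ih =>
    obtain ⟨n, t, hx⟩ := h x (by simp)
    simp [unpack2, hx, ih (fun r hr => h r (by simp [hr]))]

/-- Initializing a dict with a constant value over a key list leaves every `getD _ c` at `c`. -/
lemma getD_foldl_insert_const {ν : Type} (L : List String) (c : ν)
    (d : PySem.Dict String ν) (v : String) (h : d.getD v c = c) :
    (L.foldl (fun d i => d.insert i c) d).getD v c = c := by
  induction L generalizing d with
  | nil => exact h
  | cons x L ih =>
    apply ih
    rw [PySem.Dict.getD_insert]
    split_ifs <;> simp [h]

/-- A counting loop `d[f(p)] += 1` over a zero-initialized dict counts occurrences of `f p`. -/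
lemma countDict_getD (ids : List String) (Q : List (String × String))
    (f : String × String → String) (v : String) :
    (Q.foldl (fun d p => d.modify (f p) 0 (· + 1))
        (ids.foldl (fun d i => d.insert i (0 : Int)) PySem.Dict.empty)).getD v 0
      = ((Q.map f).count v : Int) := by
  rw [← List.foldl_map (f := f) (g := fun d x => PySem.Dict.modify d x 0 (· + 1))]
  rw [PySem.Dict.getD_foldl_modify_add_one]
  rw [getD_foldl_insert_const ids 0 _ v (by simp [PySem.Dict.getD_empty])]
  omega

-- ===== VERDICT (by name: the statement is the Claim_ definition above) =====
/-- p[1] of a two-word split. -/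
lemma pyGetD_pair_one (a b : String) : PySem.List.pyGetD [a, b] 1 "" = b := by
  simp [PySem.List.pyGetD, PySem.List.pyGet?, PySem.List.pyIdx?]

/-- p[0] of a two-word split. -/
lemma pyGetD_pair_zero (a b : String) : PySem.List.pyGetD [a, b] 0 "" = a := by
  simp [PySem.List.pyGetD, PySem.List.pyGet?, PySem.List.pyIdx?]

theorem solution_spec : Claim_equal_solution := by
  intro ids report k _hdom hpre
  unfold Spec_solution
  simp only [solution, solution_alt]
  rw [foldl_match_eq (PySem.Set.ofList report)
        (fun (p : PySem.Dict String (List String) × PySem.Dict String Int) n t =>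
          (p.1.modify n [] (· ++ [t]), p.2.modify t 0 (· + 1)))]
  rw [PySem.List.foldl_prod_mk
        (f := fun (d : PySem.Dict String (List String)) (p : String × String) =>
          d.modify p.1 [] (· ++ [p.2]))
        (g := fun (d : PySem.Dict String Int) (p : String × String) => d.modify p.2 0 (· + 1))]
  rw [PySem.List.foldl_append_singleton_eq_map]
  simp only [List.nil_append]
  have hS : ∀ r ∈ PySem.Set.ofList report, ∃ n t, PySem.Str.split₀ r = [n, t] := by
    intro r hr
    obtain ⟨n, _, t, _, h⟩ := hpre r ((PySem.Set.mem_ofList report r).1 hr)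
    exact ⟨n, t, h⟩
  rw [map_split_eq_filterMap _ hS]
  set Q := (PySem.Set.ofList report).filterMap unpack2 with hQ
  apply List.map_congr_left
  intro i _hi
  rw [PySem.Dict.getD_foldl_modify_append,
      getD_foldl_insert_const ids [] _ i (by simp [PySem.Dict.getD_empty]), List.nil_append]
  set C := Q.foldl (fun d p => PySem.Dict.modify d p.2 0 (· + 1))
      (ids.foldl (fun d id => PySem.Dict.insert d id (0 : Int)) PySem.Dict.empty) with hC
  rw [PySem.List.foldl_ite_add_one (p := fun t => C.getD t 0 ≥ k)]
  have hcnt : ∀ v, C.getD v 0 = ((Q.map Prod.snd).count v : Int) := fun v =>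
    countDict_getD ids Q Prod.snd v
  simp only [List.map_map, Function.comp_def, pyGetD_pair_one, pyGetD_pair_zero,
    List.countP_map, List.countP_filter, hcnt, zero_add, Int.natCast_inj]
  apply List.countP_congr
  intro p _
  simp [Bool.and_comm]
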